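-- pv_equiv track=rewrite | github.com/AngelosKoz/MSc_Scripts-Notes | Python_MSc/Set_21-40.py | f40
-- ===== SOURCE A (Python) =====
-- def f40(opn,clsd):
--     list_opn = []
--     list_clsd = []
--     pool = set(list(range(1,101)))
--     for j in clsd:
--         list_clsd.append( list(range(j[0], j[1]+1)))
--     for i in opn:
--         list_opn.append( list(range(i[0], i[1]+1)))
--
--     set_clsd = set(sum(list_clsd, []))
--     set_opn = set(sum(list_opn, []))
--     unwant = set_clsd & set_opn
--     res_40 = pool & set_opn
--     return res_40 - unwant
-- ===== SOURCE B (Python) =====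
-- def f40(opn, clsd):
--     # Scan the fixed universe 1..100 once, testing each cell directly against the
--     # interval endpoints -- no range materialization, no set algebra.
--     return {n for n in range(1, 101)
--             if any(a <= n <= b for a, b in opn)
--             and not any(a <= n <= b for a, b in clsd)}
-- ===== Notes on version B (the rewrite author's own statement) =====
-- stated objective: faster
-- what changed: A materializes every integer of every interval into lists, flattens them quadratically and takes set intersections/differences; B scans the fixed universe 1..100 once and keeps each cell covered by some open interval and by no closed interval, testing endpoints directly.
import Mathlib
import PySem

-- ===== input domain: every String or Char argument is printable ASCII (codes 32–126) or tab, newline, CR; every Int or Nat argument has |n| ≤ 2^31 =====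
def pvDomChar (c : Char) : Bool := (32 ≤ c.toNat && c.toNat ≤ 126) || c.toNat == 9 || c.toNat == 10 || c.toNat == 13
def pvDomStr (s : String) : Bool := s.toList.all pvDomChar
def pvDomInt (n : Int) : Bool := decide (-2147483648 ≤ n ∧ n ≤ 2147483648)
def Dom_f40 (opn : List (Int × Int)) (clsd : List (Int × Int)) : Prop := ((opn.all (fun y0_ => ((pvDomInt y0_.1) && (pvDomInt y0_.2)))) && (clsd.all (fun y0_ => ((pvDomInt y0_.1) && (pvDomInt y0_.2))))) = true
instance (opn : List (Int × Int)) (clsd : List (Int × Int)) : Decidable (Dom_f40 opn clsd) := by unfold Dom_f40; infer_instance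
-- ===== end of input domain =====

-- B scans the fixed universe 1..100 once, testing cells against interval endpoints,
-- instead of materializing every integer of every interval and doing set algebra.
-- ===== PORT A =====
def f40 (opn : List (Int × Int)) (clsd : List (Int × Int)) : List Int :=
  let list_opn : List (List Int) := []
  let list_clsd : List (List Int) := []
  let pool : PySem.Set Int := PySem.Set.ofList (PySem.List.pyRange 1 101 1)
  let list_clsd := clsd.foldl (fun acc j => acc ++ [PySem.List.pyRange j.1 (j.2 + 1) 1]) list_clsd
  let list_opn := opn.foldl (fun acc i => acc ++ [PySem.List.pyRange i.1 (i.2 + 1) 1]) list_opn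
  let set_clsd : PySem.Set Int := PySem.Set.ofList (list_clsd.foldl (fun acc x => acc ++ x) [])
  let set_opn : PySem.Set Int := PySem.Set.ofList (list_opn.foldl (fun acc x => acc ++ x) [])
  let unwant := PySem.Set.inter set_clsd set_opn
  let res_40 := PySem.Set.inter pool set_opn
  PySem.Set.diff res_40 unwant

-- ===== PORT B =====
def f40_alt (opn : List (Int × Int)) (clsd : List (Int × Int)) : List Int :=
  (PySem.List.pyRange 1 101 1).filter (fun n =>
    opn.any (fun p => decide (p.1 ≤ n) && decide (n ≤ p.2)) &&
    !clsd.any (fun p => decide (p.1 ≤ n) && decide (n ≤ p.2)))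

-- ===== PRECONDITION & SPEC =====
def Spec_f40 (opn : List (Int × Int)) (clsd : List (Int × Int)) (out : List Int) : Prop := out = f40_alt opn clsd
instance (opn : List (Int × Int)) (clsd : List (Int × Int)) (out : List Int) : Decidable (Spec_f40 opn clsd out) := by unfold Spec_f40; infer_instance

-- ===== CLAIM (what is proved, stated in full; the proofs are below) =====
def Claim_equal_f40 : Prop := ∀ (opn : List (Int × Int)) (clsd : List (Int × Int)), Dom_f40 opn clsd → Spec_f40 opn clsd (f40 opn clsd)

-- ===== LEMMAS AND PROOFS =====
-- PySem.Set.inter / diff / contains, unfolded to List operations (definitional)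
theorem inter_eq_filter (s t : List Int) :
    PySem.Set.inter s t = s.filter (fun x => PySem.Set.contains t x) := rfl

theorem diff_eq_filter (s t : List Int) :
    PySem.Set.diff s t = s.filter (fun x => !PySem.Set.contains t x) := rfl

theorem contains_eq_decide_mem (s : List Int) (n : Int) :
    PySem.Set.contains s n = decide (n ∈ s) := by
  simp [PySem.Set.contains]

-- membership in sum([list(range(a, b+1)) for (a,b) in l], []) is interval coverage
theorem mem_sum_ranges (l : List (Int × Int)) (n : Int) :
    (n ∈ (l.foldl (fun acc j => acc ++ [PySem.List.pyRange j.1 (j.2 + 1) 1]) ([] : List (List Int))).foldl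
        (fun acc x => acc ++ x) []) ↔ ∃ p ∈ l, p.1 ≤ n ∧ n ≤ p.2 := by
  rw [PySem.List.foldl_append_singleton_eq_map, PySem.List.foldl_append_eq_flatten]
  simp only [List.nil_append, List.mem_flatten, List.mem_map]
  constructor
  · rintro ⟨block, ⟨p, hp, rfl⟩, hn⟩
    rw [PySem.List.mem_pyRange_one] at hn
    exact ⟨p, hp, hn.1, by omega⟩
  · rintro ⟨p, hp, h1, h2⟩
    exact ⟨_, ⟨p, hp, rfl⟩, by rw [PySem.List.mem_pyRange_one]; omega⟩

-- ===== VERDICT (by name: the statement is the Claim_ definition above) =====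
theorem f40_spec : Claim_equal_f40 := by
  intro opn clsd _
  show f40 opn clsd = f40_alt opn clsd
  unfold f40 f40_alt
  simp only [inter_eq_filter, diff_eq_filter]
  rw [PySem.Set.ofList_eq_self_of_nodup _ (PySem.List.nodup_pyRange_one 1 101),
      List.filter_filter]
  refine List.filter_congr (fun n _ => ?_)
  have hO := mem_sum_ranges opn n
  have hC := mem_sum_ranges clsd n
  simp only [contains_eq_decide_mem, List.mem_filter, PySem.Set.mem_ofList, hO, hC]
  by_cases h1 : ∃ p ∈ opn, p.1 ≤ n ∧ n ≤ p.2 <;>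
    by_cases h2 : ∃ p ∈ clsd, p.1 ≤ n ∧ n ≤ p.2 <;>
      simp [h1, h2, List.any_eq_true]
  push Not at h2
  intro a b hab ha
  have := h2 (a, b) hab
  simp at this
  omega
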